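-- pv_equiv track=rewrite | github.com/QinyuMa316/RetroSynthesisAgent | RetroSynAgent/treebuilder.py | get_product_dict
-- ===== SOURCE A (Python) =====
-- def get_product_dict(reactions_dict):
--     '''
--     reactions_dict[str(idx)] = {
--         'reactants': tuple(reactants),
--         'products': tuple(products),
--         'conditions': conditions,
--     }
--     '''
--     product_dict = {}
--     # Iterate over reactions_entry dictionary
--     for idx, entry in reactions_dict.items():
--         products = entry['products']
--         # Iterate over products
--         for product in products:
--             product = product.strip()
--             if product not in product_dict:
--                 product_dict[product] = []
--             product_dict[product].append(idx)
--
--     for key, value in product_dict.items():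
--         product_dict[key] = tuple(value)
--     return product_dict
-- ===== SOURCE B (Python) =====
-- def get_product_dict(reactions_dict):
--     # Flatten once into (stripped product, idx) pairs, then group: distinct
--     # products in first-occurrence order, each group by a scan of the pair list.
--     pairs = [(product.strip(), idx)
--              for idx, entry in reactions_dict.items()
--              for product in entry['products']]
--     return {key: tuple(i for k, i in pairs if k == key)
--             for key in dict.fromkeys(k for k, _ in pairs)}
-- ===== Notes on version B (the rewrite author's own statement) =====
-- stated objective: alternative
-- what changed: Replaces A's incremental dict-of-lists accumulation with a flatten-then-group strategy: collect all (stripped product, idx) pairs in one flat list, deduplicate the product names in first-occurrence order, and build each index tuple by a scan of the flat pair list.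
import Mathlib
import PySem

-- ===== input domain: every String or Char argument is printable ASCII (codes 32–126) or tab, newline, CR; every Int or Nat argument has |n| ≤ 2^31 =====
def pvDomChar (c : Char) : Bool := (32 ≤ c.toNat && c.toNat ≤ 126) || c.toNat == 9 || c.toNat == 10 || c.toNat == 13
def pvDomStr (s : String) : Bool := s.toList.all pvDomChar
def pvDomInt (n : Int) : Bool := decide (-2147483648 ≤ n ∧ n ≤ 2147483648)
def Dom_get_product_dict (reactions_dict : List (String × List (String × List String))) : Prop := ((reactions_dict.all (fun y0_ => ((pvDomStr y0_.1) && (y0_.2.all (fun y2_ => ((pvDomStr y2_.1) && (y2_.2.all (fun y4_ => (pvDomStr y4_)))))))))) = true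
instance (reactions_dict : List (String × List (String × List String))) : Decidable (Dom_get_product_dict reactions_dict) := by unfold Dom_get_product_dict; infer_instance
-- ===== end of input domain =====

-- B replaces A's incremental dict-of-lists accumulation by flatten-then-group
-- (collect all (stripped product, idx) pairs once, dedup keys in first-occurrence
-- order, build each group by a scan of the flat pair list); objective: alternative.

-- ===== PORT A =====
def get_product_dict (reactions_dict : List (String × List (String × List String))) : List (String × List String) :=
  let product_dict : PySem.Dict String (List String) :=
    reactions_dict.foldl (fun product_dict ie =>
      -- products = entry['products']; a missing 'products' key is a KeyError,
      -- excluded by Pre_; the [] default is never used inside Pre_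
      let products := (PySem.Dict.mk ie.2).getD "products" []
      products.foldl (fun product_dict product0 =>
        let product := PySem.Str.strip product0
        let product_dict :=
          if product_dict.contains product then product_dict
          else product_dict.insert product []
        product_dict.modify product [] (fun v => v ++ [ie.1])) product_dict)
      PySem.Dict.empty
  -- for key, value in product_dict.items(): product_dict[key] = tuple(value)
  -- (tuple and list are both List String under the type convention)
  let product_dict := product_dict.items.foldl (fun d kv => d.insert kv.1 kv.2) product_dict
  product_dict.items

-- ===== PORT B =====
def get_product_dict_alt (reactions_dict : List (String × List (String × List String))) : List (String × List String) :=
  let pairs : List (String × String) :=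
    reactions_dict.flatMap (fun ie =>
      ((PySem.Dict.mk ie.2).getD "products" []).map
        (fun product => (PySem.Str.strip product, ie.1)))
  (PySem.List.dedup (pairs.map (fun p => p.1))).map
    (fun key => (key, (pairs.filter (fun p => p.1 == key)).map (fun p => p.2)))

-- ===== PRECONDITION & SPEC =====
-- Pre_ excludes exactly the inputs on which A raises KeyError: an entry without a 'products' key.
def Pre_get_product_dict (reactions_dict : List (String × List (String × List String))) : Prop :=
  ∀ e ∈ reactions_dict, "products" ∈ e.2.map Prod.fst
instance (reactions_dict : List (String × List (String × List String))) : Decidable (Pre_get_product_dict reactions_dict) := by unfold Pre_get_product_dict; infer_instance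
def pvWitness_get_product_dict : (List (String × List (String × List String))) :=
  [("1", [("products", [" a", "b "]), ("reactants", ["c"])]), ("2", [("products", ["a"])])]

def Spec_get_product_dict (reactions_dict : List (String × List (String × List String))) (out : List (String × List String)) : Prop := out = get_product_dict_alt reactions_dict
instance (reactions_dict : List (String × List (String × List String))) (out : List (String × List String)) : Decidable (Spec_get_product_dict reactions_dict out) := by unfold Spec_get_product_dict; infer_instance

-- ===== CLAIM (what is proved, stated in full; the proofs are below) =====
def Claim_equal_get_product_dict : Prop := ∀ (reactions_dict : List (String × List (String × List String))), Dom_get_product_dict reactions_dict → Pre_get_product_dict reactions_dict → Spec_get_product_dict reactions_dict (get_product_dict reactions_dict)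

-- ===== LEMMAS AND PROOFS =====

-- A's inner-loop body (conditional seeding with [] followed by append) is one `modify`.
theorem pv_step_eq (d : PySem.Dict String (List String)) (p idx : String) :
    (if d.contains p then d else d.insert p []).modify p [] (fun v => v ++ [idx])
      = d.modify p [] (fun v => v ++ [idx]) := by
  by_cases h : d.contains p
  · simp [h]
  · have h' : d.contains p = false := by simpa using h
    simp only [h', Bool.false_eq_true, if_false]
    simp [PySem.Dict.modify, PySem.Dict.getD_insert_self, PySem.Dict.insert_insert_self,
      PySem.Dict.getD_of_not_contains d ([] : List String) h']

-- inserting each of a dict's own items back (A's tuple-conversion loop) is a no-op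
theorem pv_insert_items_noop (l : List (String × List String))
    (d : PySem.Dict String (List String)) (hnd : d.keys.Nodup)
    (h : ∀ kv ∈ l, d.get? kv.1 = some kv.2) :
    l.foldl (fun d kv => d.insert kv.1 kv.2) d = d := by
  induction l with
  | nil => rfl
  | cons kv t ih =>
    have hc : d.contains kv.1 = true := by
      rw [PySem.Dict.contains_eq_isSome_get?, h kv List.mem_cons_self]; rfl
    have hkv : d.insert kv.1 kv.2 = d := by
      apply PySem.Dict.ext
      rw [PySem.Dict.items_insert_of_contains d kv.2 hc]
      conv_rhs => rw [← List.map_id d.items]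
      apply List.map_congr_left
      intro p hp
      by_cases hpk : (p.1 == kv.1) = true
      · have hk : p.1 = kv.1 := by simpa using hpk
        have hg : d.get? p.1 = some p.2 := by
          have : (p.1, p.2) ∈ d.items := by simpa using hp
          exact PySem.Dict.get?_of_mem_items d this hnd
        rw [hk, h kv List.mem_cons_self, Option.some.injEq] at hg
        simp [Prod.ext_iff, hk, hg]
      · simp [hpk]
    rw [List.foldl_cons, hkv]
    exact ih (fun p hp => h p (List.mem_cons_of_mem _ hp))

-- ===== VERDICT (by name: the statement is the Claim_ definition above) =====
theorem get_product_dict_spec : Claim_equal_get_product_dict := by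
  intro rd _ _
  unfold Spec_get_product_dict get_product_dict get_product_dict_alt
  dsimp only
  set pairs : List (String × String) :=
    rd.flatMap (fun ie => ((PySem.Dict.mk ie.2).getD "products" []).map
      (fun product => (PySem.Str.strip product, ie.1))) with hpairs
  have hA : (rd.foldl (fun product_dict ie =>
      ((PySem.Dict.mk ie.2).getD "products" []).foldl (fun product_dict product0 =>
        (if product_dict.contains (PySem.Str.strip product0) then product_dict
         else product_dict.insert (PySem.Str.strip product0) []).modify
          (PySem.Str.strip product0) [] (fun v => v ++ [ie.1])) product_dict)
      PySem.Dict.empty)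
      = pairs.foldl (fun d p => d.modify p.1 [] (fun v => v ++ [p.2])) PySem.Dict.empty := by
    rw [hpairs, List.foldl_flatMap]
    congr 1
    funext d ie
    rw [List.foldl_map]
    congr 1
    funext d' p0
    exact pv_step_eq d' _ _
  rw [hA]
  set d := pairs.foldl (fun d p => d.modify p.1 [] (fun v => v ++ [p.2])) PySem.Dict.empty with hd
  have hnd : d.keys.Nodup := by
    rw [hd]
    exact PySem.Dict.nodup_keys_foldl_modify_key pairs (fun p => p.1) []
      (fun _ p => (fun v => v ++ [p.2])) PySem.Dict.empty (by simp)
  have hkeys : d.keys = PySem.List.dedup (pairs.map (fun p => p.1)) := by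
    rw [hd, PySem.Dict.keys_foldl_modify_key pairs (fun p => p.1) []
      (fun _ p => (fun v => v ++ [p.2])) PySem.Dict.empty]
    simp [PySem.Set.update_nil_left]
  rw [pv_insert_items_noop d.items d hnd
      (fun kv hkv => PySem.Dict.get?_of_mem_items d (by simpa using hkv) hnd)]
  rw [PySem.Dict.items_eq_map_keys d hnd ([] : List String), hkeys]
  apply List.map_congr_left
  intro k hk
  rw [hd, PySem.Dict.getD_foldl_modify_append]
  simp
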